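-- pv_equiv track=rewrite | github.com/CelineKong65/Dummy | DPL Assignment/Yesmolar Bakery Store.py | raw_replace
-- ===== SOURCE A (Python) =====
-- def raw_replace(s, old, new):
--     result = ""
--     i = 0
--     while i < len(s):
--         if s[i:i+len(old)] == old:
--             result += new
--             i += len(old)
--         else:
--             result += s[i]
--             i += 1
--     return result
-- ===== SOURCE B (Python) =====
-- def raw_replace(s, old, new):
--     return s.replace(old, new)
-- ===== Notes on version B (the rewrite author's own statement) =====
-- stated objective: idiomatic
-- what changed: Replaces the hand-written index/slice while-loop with repeated string concatenation by a single call to the built-in str.replace.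
-- outside the precondition, e.g. on raw_replace('', '', 'x'): A returns '', B returns 'x'; on raw_replace('ab', '', 'x'): A does not finish within the time limit, B returns 'xaxbx'
import Mathlib
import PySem

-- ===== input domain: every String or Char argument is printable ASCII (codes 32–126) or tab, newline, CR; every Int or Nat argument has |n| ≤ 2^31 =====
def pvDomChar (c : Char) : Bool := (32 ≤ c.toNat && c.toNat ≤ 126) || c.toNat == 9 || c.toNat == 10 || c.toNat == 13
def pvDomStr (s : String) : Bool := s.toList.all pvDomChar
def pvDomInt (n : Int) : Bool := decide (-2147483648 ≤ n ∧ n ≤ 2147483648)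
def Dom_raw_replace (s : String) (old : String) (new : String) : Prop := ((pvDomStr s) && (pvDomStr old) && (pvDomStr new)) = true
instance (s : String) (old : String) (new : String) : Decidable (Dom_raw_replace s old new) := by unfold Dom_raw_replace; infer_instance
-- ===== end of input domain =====

-- B replaces A's hand-written index/slice while-loop (repeated concatenation) by the idiomatic str.replace; A = B wherever old is non-empty.


-- ===== PORT A =====
-- the while-loop of A: fuel makes the recursion total (with old ≠ [], s.length + 1 steps always suffice)
def rawReplaceGo (s old new : List Char) : Nat → Nat → List Char → List Char
  | 0, _, result => result
  | fuel+1, i, result =>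
    if i < s.length then
      if PySem.Chars.slice s (some (i : Int)) (some ((i : Int) + (old.length : Int))) = old then
        rawReplaceGo s old new fuel (i + old.length) (result ++ new)
      else
        match PySem.Chars.pyGet? s (i : Int) with
        | some c => rawReplaceGo s old new fuel (i + 1) (result ++ [c])
        | none => result
    else result

def raw_replace (s : String) (old : String) (new : String) : String :=
  String.ofList (rawReplaceGo s.toList old.toList new.toList (s.toList.length + 1) 0 [])

-- ===== PORT B =====
def raw_replace_alt (s : String) (old : String) (new : String) : String :=
  PySem.Str.replace s old new

-- ===== PRECONDITION & SPEC =====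
-- Pre_ excludes empty `old`: there A loops forever on every non-empty s, and on s = "" its
-- accidental result "" disagrees with str.replace ("".replace("","x") = "x").
def Pre_raw_replace (s : String) (old : String) (new : String) : Prop := old ≠ ""
instance (s : String) (old : String) (new : String) : Decidable (Pre_raw_replace s old new) := by
  unfold Pre_raw_replace; infer_instance

def pvWitness_raw_replace : String × String × String := ("abcabca", "bc", "xy")

def Spec_raw_replace (s : String) (old : String) (new : String) (out : String) : Prop := out = raw_replace_alt s old new
instance (s : String) (old : String) (new : String) (out : String) : Decidable (Spec_raw_replace s old new out) := by unfold Spec_raw_replace; infer_instance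

-- ===== CLAIM (what is proved, stated in full; the proofs are below) =====
def Claim_equal_raw_replace : Prop := ∀ (s : String) (old : String) (new : String), Dom_raw_replace s old new → Pre_raw_replace s old new → Spec_raw_replace s old new (raw_replace s old new)

-- ===== LEMMAS AND PROOFS =====

theorem rawReplaceGo_succ (s old new : List Char) (fuel i : Nat) (result : List Char) :
    rawReplaceGo s old new (fuel + 1) i result =
      (if i < s.length then
        if PySem.Chars.slice s (some (i : Int)) (some ((i : Int) + (old.length : Int))) = old then
          rawReplaceGo s old new fuel (i + old.length) (result ++ new)
        else
          match PySem.Chars.pyGet? s (i : Int) with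
          | some c => rawReplaceGo s old new fuel (i + 1) (result ++ [c])
          | none => result
      else result) := rfl

theorem replaceGo_cons (old new : List Char) (fuel : Nat) (c : Char) (t acc : List Char) :
    PySem.Chars.replace.go old new (fuel + 1) (c :: t) acc =
      (if old.isPrefixOf (c :: t) then
        PySem.Chars.replace.go old new fuel (List.drop old.length (c :: t)) (new.reverse ++ acc)
      else PySem.Chars.replace.go old new fuel t (c :: acc)) := rfl

-- replace.go's accumulator commutes out
theorem replace_go_acc (old new : List Char) (fuel : Nat) :
    ∀ (l acc : List Char),
      PySem.Chars.replace.go old new fuel l acc = acc.reverse ++ PySem.Chars.replace.go old new fuel l [] := by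
  induction fuel with
  | zero => intro l acc; simp [PySem.Chars.replace.go]
  | succ fuel ih =>
    intro l acc
    cases l with
    | nil => simp [PySem.Chars.replace.go]
    | cons c t =>
      simp only [PySem.Chars.replace.go]
      by_cases h : old.isPrefixOf (c :: t)
      · simp [h, ih (List.drop old.length (c :: t)) (new.reverse ++ acc),
          ih (List.drop old.length (c :: t)) new.reverse]
      · simp [h, ih t (c :: acc), ih t [c]]

theorem rawReplaceGo_eq_go (s old new : List Char) (hold : old ≠ []) :
    ∀ (fuel i : Nat) (result : List Char), s.length - i ≤ fuel → i ≤ s.length →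
      rawReplaceGo s old new (fuel + 1) i result
        = result ++ PySem.Chars.replace.go old new fuel (s.drop i) [] := by
  intro fuel
  induction fuel with
  | zero =>
    intro i result hf hi
    have : i = s.length := by omega
    subst this
    simp [rawReplaceGo, PySem.Chars.replace.go]
  | succ fuel ih =>
    intro i result hf hi
    by_cases hlt : i < s.length
    · obtain ⟨c, t, hct⟩ : ∃ c t, s.drop i = c :: t := by
        cases hd : s.drop i with
        | nil => exfalso; have := List.drop_eq_nil_iff.mp hd; omega
        | cons c t => exact ⟨c, t, rfl⟩
      have hslice : PySem.Chars.slice s (some (i : Int)) (some ((i : Int) + (old.length : Int)))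
          = (s.drop i).take old.length := by
        simpa using PySem.List.slice_natCast_add s i old.length
      have hpref : (PySem.Chars.slice s (some (i : Int)) (some ((i : Int) + (old.length : Int))) = old)
          ↔ old.isPrefixOf (s.drop i) := by
        rw [hslice, List.isPrefixOf_iff_prefix]
        constructor
        · intro h; rw [← h]; exact List.take_prefix _ _
        · intro h; exact (List.prefix_iff_eq_take.mp h).symm
      by_cases hm : old.isPrefixOf (s.drop i)
      · have hcond : PySem.Chars.slice s (some (i : Int)) (some ((i : Int) + (old.length : Int))) = old :=
          hpref.mpr hm
        have hle : old.length ≤ s.length - i := by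
          have := (List.isPrefixOf_iff_prefix.mp hm).length_le
          simp at this; omega
        have hpos : 1 ≤ old.length := by
          cases old with
          | nil => exact absurd rfl hold
          | cons _ _ => simp
        rw [rawReplaceGo_succ, if_pos hlt, if_pos hcond,
          ih (i + old.length) (result ++ new) (by omega) (by omega)]
        have hm' : old.isPrefixOf (c :: t) := by rw [← hct]; exact hm
        conv_rhs => rw [hct]
        have hdd : List.drop old.length (c :: t) = List.drop (i + old.length) s := by
          rw [← hct, List.drop_drop]
        rw [replaceGo_cons, if_pos hm',
          replace_go_acc old new fuel (List.drop old.length (c :: t)) (new.reverse ++ []), hdd]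
        simp
      · have hcond : ¬ PySem.Chars.slice s (some (i : Int)) (some ((i : Int) + (old.length : Int))) = old := by
          intro h; exact hm (hpref.mp h)
        have hget : PySem.Chars.pyGet? s (i : Int) = some c := by
          have : s[i]? = some c := by
            have : (List.drop i s)[0]? = some c := by rw [hct]; rfl
            simpa using this
          simpa using this
        rw [rawReplaceGo_succ, if_pos hlt, if_neg hcond, hget]
        dsimp only
        rw [ih (i + 1) (result ++ [c]) (by omega) (by omega)]
        have hm' : ¬ old.isPrefixOf (c :: t) := by rw [← hct]; exact hm
        have ht : t = List.drop (i + 1) s := by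
          have h1 : List.drop 1 (List.drop i s) = List.drop (i + 1) s := List.drop_drop
          rw [hct] at h1; simpa using h1
        conv_rhs => rw [hct]
        rw [replaceGo_cons, if_neg hm', replace_go_acc old new fuel t [c], ht]
        simp
    · have : i = s.length := by omega
      subst this
      simp [rawReplaceGo, PySem.Chars.replace.go]

-- ===== VERDICT (by name: the statement is the Claim_ definition above) =====
theorem raw_replace_spec : Claim_equal_raw_replace := by
  intro s old new _ hpre
  have hold : old.toList ≠ [] := by
    intro h
    apply hpre
    have := congrArg String.ofList h
    simpa using this
  unfold Spec_raw_replace raw_replace raw_replace_alt PySem.Str.replace PySem.Chars.replace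
  have hne : old.toList.isEmpty = false := by simpa using hold
  rw [hne]
  simp only [Bool.false_eq_true, if_false]
  rw [show s.toList.length + 1 = s.toList.length + 1 from rfl,
    rawReplaceGo_eq_go s.toList old.toList new.toList hold s.toList.length 0 [] (by omega) (by omega)]
  simp
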